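-- pv_equiv track=rewrite | github.com/isnanramalia/cryptography2023 | tranposisi/orthogal/Orthogonal atas kanan.py | orthogonal_decrypt
-- ===== SOURCE A (Python) =====
-- import math  # Import module math untuk fungsi ceil() dan floor()
--
-- def orthogonal_decrypt(encrypted_text, step_size):
--     matrix_height = step_size  # Tinggi matriks
--     matrix_width = math.ceil(len(encrypted_text) / matrix_height)  # Lebar matriks
--
--     # Inisialisasi matriks kosong
--     matrix_representation = [[0] * matrix_width for _ in range(matrix_height)]
--
--     # Isi matriks sesuai dengan algoritma enkripsi yang digunakan
--     index = 0
--     for i in range(matrix_height):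
--         if i % 2 == 0:
--             for j in range(matrix_width - 1, -1, -1):
--                 matrix_representation[i][j] = encrypted_text[index]
--                 index += 1
--         else:
--             for j in range(matrix_width):
--                 matrix_representation[i][j] = encrypted_text[index]
--                 index += 1
--
--     # Baca karakter-karakter dari matriks dalam urutan yang benar untuk mendapatkan teks asli
--     decrypted_text = ""
--     for j in range(matrix_width):
--         for i in range(matrix_height):
--             if matrix_representation[i][j] != "@":
--                 decrypted_text += matrix_representation[i][j]
--
--     return decrypted_text.replace("-"," ")
-- ===== SOURCE B (Python) =====
-- import math
--
-- def orthogonal_decrypt(encrypted_text, step_size):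
--     matrix_height = step_size
--     matrix_width = math.ceil(len(encrypted_text) / matrix_height)
--     chars = []
--     for j in range(matrix_width):
--         for i in range(matrix_height):
--             idx = i * matrix_width + (matrix_width - 1 - j if i % 2 == 0 else j)
--             c = encrypted_text[idx]
--             if c != "@":
--                 chars.append(c)
--     return "".join(chars).replace("-", " ")
-- ===== Notes on version B (the rewrite author's own statement) =====
-- stated objective: simpler
-- what changed: B drops A's materialised boustrophedon matrix (a fill pass writing every ciphertext character into a 2D list, then a column-major read pass) and instead reads each output character directly from the ciphertext with the index formula i*width + (width-1-j if the row is even else j).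
import Mathlib
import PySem

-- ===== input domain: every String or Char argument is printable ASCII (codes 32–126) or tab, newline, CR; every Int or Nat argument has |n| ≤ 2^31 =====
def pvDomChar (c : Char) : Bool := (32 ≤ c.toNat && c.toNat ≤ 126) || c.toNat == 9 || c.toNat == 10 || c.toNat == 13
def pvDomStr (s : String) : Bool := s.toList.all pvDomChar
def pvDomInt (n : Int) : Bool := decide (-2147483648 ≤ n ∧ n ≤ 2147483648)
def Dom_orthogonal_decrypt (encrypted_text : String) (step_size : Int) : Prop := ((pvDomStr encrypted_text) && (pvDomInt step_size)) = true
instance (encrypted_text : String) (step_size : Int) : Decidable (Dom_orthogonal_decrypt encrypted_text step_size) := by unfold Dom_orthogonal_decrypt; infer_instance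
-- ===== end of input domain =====

-- B drops A's materialised boustrophedon matrix (fill pass + read pass) and reads each output
-- character straight from the ciphertext by index arithmetic; objective: simpler (same asymptotic cost).

-- ===== PORT A =====
-- matrix_representation[i][j] = c  (i, j always in range when reached)
def pvSet2 (m : List (List Char)) (i j : Nat) (c : Char) : List (List Char) :=
  m.set i ((m.getD i []).set j c)

-- one body of A's fill loop: read encrypted_text[index] (none = IndexError), write it, index += 1
def pvStep (text : List Char) (i : Nat) (st : Option (List (List Char)) × Int) (j : Nat) :
    Option (List (List Char)) × Int :=
  match st.1 with
  | none => st
  | some m =>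
    match PySem.List.pyGet? text st.2 with
    | none => (none, st.2)
    | some c => (some (pvSet2 m i j c), st.2 + 1)

-- A's fill pass over rows i (even rows right-to-left, odd rows left-to-right)
def pvFill (text : List Char) (h w : Nat) : Option (List (List Char)) × Int :=
  (List.range h).foldl
    (fun st i =>
      (if i % 2 == 0 then (List.range w).reverse else List.range w).foldl (pvStep text i) st)
    (some (List.replicate h (List.replicate w '\x00')), 0)

-- A's read pass: column-major, skipping '@'
def pvRead (m : List (List Char)) (h w : Nat) : List Char :=
  (List.range w).foldl (fun acc j =>
    (List.range h).foldl (fun acc i =>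
      let c := (m.getD i []).getD j '\x00'
      if c ≠ '@' then acc ++ [c] else acc) acc) []

def orthogonal_decrypt (encrypted_text : String) (step_size : Int) : String :=
  if step_size = 0 then ""  -- ZeroDivisionError in Python; excluded by Pre_
  else
    let text := encrypted_text.toList
    let h : Nat := step_size.toNat
    let w : Nat := (-(PySem.Int.floordiv (-(text.length : Int)) step_size)).toNat  -- math.ceil(len/step)
    match (pvFill text h w).1 with
    | none => ""  -- IndexError in Python; excluded by Pre_
    | some m => PySem.Str.replace (String.ofList (pvRead m h w)) "-" " "

-- ===== PORT B =====
def orthogonal_decrypt_alt (encrypted_text : String) (step_size : Int) : String :=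
  if step_size = 0 then ""  -- ZeroDivisionError in Python; excluded by Pre_
  else
    let text := encrypted_text.toList
    let h : Nat := step_size.toNat
    let w : Nat := (-(PySem.Int.floordiv (-(text.length : Int)) step_size)).toNat  -- math.ceil(len/step)
    let chars := (List.range w).foldl (fun acc j =>
      (List.range h).foldl (fun acc i =>
        match PySem.List.pyGet? text ((i * w + (if i % 2 == 0 then w - 1 - j else j) : Nat) : Int) with
        | none => acc  -- IndexError in Python; excluded by Pre_
        | some c => if c ≠ '@' then acc ++ [c] else acc) acc) []
    PySem.Str.replace (String.ofList chars) "-" " "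

-- ===== PRECONDITION & SPEC =====
-- Pre_ excludes exactly the inputs where A raises: step_size = 0 (ZeroDivisionError) and
-- positive step_size not dividing the length (IndexError while filling the padded matrix).
def Pre_orthogonal_decrypt (encrypted_text : String) (step_size : Int) : Prop :=
  step_size ≠ 0 ∧ (0 < step_size → step_size ∣ (encrypted_text.toList.length : Int))
instance (encrypted_text : String) (step_size : Int) : Decidable (Pre_orthogonal_decrypt encrypted_text step_size) := by unfold Pre_orthogonal_decrypt; infer_instance

def pvWitness_orthogonal_decrypt : String × Int := ("ba-", 1)

def Spec_orthogonal_decrypt (encrypted_text : String) (step_size : Int) (out : String) : Prop := out = orthogonal_decrypt_alt encrypted_text step_size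
instance (encrypted_text : String) (step_size : Int) (out : String) : Decidable (Spec_orthogonal_decrypt encrypted_text step_size out) := by unfold Spec_orthogonal_decrypt; infer_instance

-- ===== CLAIM (what is proved, stated in full; the proofs are below) =====
def Claim_equal_orthogonal_decrypt : Prop := ∀ (encrypted_text : String) (step_size : Int), Dom_orthogonal_decrypt encrypted_text step_size → Pre_orthogonal_decrypt encrypted_text step_size → Spec_orthogonal_decrypt encrypted_text step_size (orthogonal_decrypt encrypted_text step_size)

-- ===== LEMMAS AND PROOFS =====

-- the source column read for output cell (i, j)
def pvCol (i j w : Nat) : Nat := if i % 2 == 0 then w - 1 - j else j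

-- the row the fill pass produces for row i (its characters start at text index i*w)
def pvSpecRow (text : List Char) (w i : Nat) : List Char :=
  (List.range w).map (fun j => text.getD (i * w + pvCol i j w) '\x00')

lemma pvFillRowEven (text : List Char) (i : Nat) :
    ∀ (b : Nat) (m : List (List Char)) (k : Nat) (r : List Char),
      m[i]? = some r → b ≤ r.length → k + b ≤ text.length →
      List.foldl (pvStep text i) (some m, (k : Int)) ((List.range b).reverse) =
        (some (m.set i ((List.range b).map (fun j => text.getD (k + (b - 1 - j)) '\x00') ++ r.drop b)),
          ((k + b : Nat) : Int)) := by
  intro b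
  induction b with
  | zero =>
    intro m k r hm hb hk
    obtain ⟨hi, hv⟩ := List.getElem?_eq_some_iff.mp hm
    simp [← hv, List.set_getElem_self hi]
  | succ b ih =>
    intro m k r hm hb hk
    obtain ⟨hi, -⟩ := List.getElem?_eq_some_iff.mp hm
    have hkl : k < text.length := by omega
    rw [show (List.range (b+1)).reverse = b :: (List.range b).reverse by simp [List.range_succ]]
    rw [List.foldl_cons]
    have hstep : pvStep text i (some m, (k:Int)) b
        = (some (m.set i (r.set b (text.getD k '\x00'))), (k:Int)+1) := by
      simp [pvStep, PySem.List.pyGet?_natCast, List.getElem?_eq_getElem hkl, pvSet2,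
        List.getD_eq_getElem?_getD, hm]
    rw [hstep]
    have hb' : b ≤ (r.set b (text.getD k '\x00')).length := by simp; omega
    have hm' : (m.set i (r.set b (text.getD k '\x00')))[i]? = some (r.set b (text.getD k '\x00')) := by
      simp [hi]
    rw [show ((k:Int)+1) = ((k+1 : Nat) : Int) by push_cast; ring]
    rw [ih _ _ _ hm' hb' (by omega)]
    have hbr : b < r.length := by omega
    simp only [Prod.mk.injEq, Option.some.injEq]
    refine ⟨?_, ?_⟩
    · rw [List.set_set]
      congr 1
      rw [List.drop_set, if_neg (lt_irrefl b), Nat.sub_self, List.drop_eq_getElem_cons hbr,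
        List.set_cons_zero]
      rw [List.range_succ, List.map_append]
      simp only [List.map_cons, List.map_nil]
      rw [List.append_assoc]
      congr 1
      · apply List.map_congr_left
        intro j hj
        have : j < b := List.mem_range.mp hj
        have harg : k + 1 + (b - 1 - j) = k + (b + 1 - 1 - j) := by omega
        rw [harg]
      · simp [List.getD_eq_getElem?_getD, List.getElem?_eq_getElem hkl]
    · push_cast; ring

lemma pvFillRowOdd (text : List Char) (i : Nat) :
    ∀ (b a : Nat) (m : List (List Char)) (k : Nat) (r : List Char),
      m[i]? = some r → a + b ≤ r.length → k + b ≤ text.length →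
      List.foldl (pvStep text i) (some m, (k : Int)) (List.range' a b) =
        (some (m.set i (r.take a ++ (List.range b).map (fun u => text.getD (k + u) '\x00') ++ r.drop (a + b))),
          ((k + b : Nat) : Int)) := by
  intro b
  induction b with
  | zero =>
    intro a m k r hm hb hk
    obtain ⟨hi, hv⟩ := List.getElem?_eq_some_iff.mp hm
    simp [← hv, List.set_getElem_self hi, List.take_append_drop]
  | succ b ih =>
    intro a m k r hm hb hk
    obtain ⟨hi, -⟩ := List.getElem?_eq_some_iff.mp hm
    have hkl : k < text.length := by omega
    have har : a < r.length := by omega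
    rw [List.range'_succ, List.foldl_cons]
    have hstep : pvStep text i (some m, (k:Int)) a
        = (some (m.set i (r.set a (text.getD k '\x00'))), (k:Int)+1) := by
      simp [pvStep, PySem.List.pyGet?_natCast, List.getElem?_eq_getElem hkl, pvSet2,
        List.getD_eq_getElem?_getD, hm]
    rw [hstep]
    have hm' : (m.set i (r.set a (text.getD k '\x00')))[i]? = some (r.set a (text.getD k '\x00')) := by
      simp [hi]
    rw [show ((k:Int)+1) = ((k+1 : Nat) : Int) by push_cast; ring]
    rw [ih _ _ _ _ hm' (by simp; omega) (by omega)]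
    simp only [Prod.mk.injEq, Option.some.injEq]
    refine ⟨?_, by push_cast; ring⟩
    rw [List.set_set]
    congr 1
    rw [List.drop_set_of_lt (by omega)]
    rw [show (r.set a (text.getD k '\x00')).take (a+1) = r.take a ++ [text.getD k '\x00'] by
      simp [List.take_set, List.take_add_one, har, List.set_eq_of_length_le]]
    rw [List.range_succ_eq_map, List.map_cons, List.map_map]
    have hmaps : (List.range b).map ((fun u => text.getD (k + u) '\x00') ∘ (· + 1))
        = (List.range b).map (fun u => text.getD (k + 1 + u) '\x00') := by
      apply List.map_congr_left
      intro u hu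
      simp only [Function.comp]
      have harg : k + (u + 1) = k + 1 + u := by omega
      rw [harg]
    rw [← hmaps]
    simp only [Nat.add_zero]
    rw [show a + 1 + b = a + (b+1) by omega]
    simp [List.append_assoc]

lemma pvFillRows (text : List Char) (w : Nat) :
    ∀ (b t : Nat), (t + b) * w ≤ text.length →
      (List.range' t b).foldl
        (fun st i =>
          (if i % 2 == 0 then (List.range w).reverse else List.range w).foldl (pvStep text i) st)
        (some ((List.range t).map (pvSpecRow text w) ++ List.replicate b (List.replicate w '\x00')),
          ((t * w : Nat) : Int)) =
      (some ((List.range (t + b)).map (pvSpecRow text w)), (((t + b) * w : Nat) : Int)) := by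
  intro b
  induction b with
  | zero => intro t ht; simp
  | succ b ih =>
    intro t ht
    rw [List.range'_succ, List.foldl_cons]
    have hlen : (List.range t).length = t := List.length_range
    have hm : ((List.range t).map (pvSpecRow text w)
        ++ List.replicate (b+1) (List.replicate w '\x00'))[t]? = some (List.replicate w '\x00') := by
      rw [List.replicate_succ]
      rw [show t = ((List.range t).map (pvSpecRow text w)).length by simp]
      simp
    have hk : t * w + w ≤ text.length := by
      calc t * w + w = (t + 1) * w := by ring
        _ ≤ (t + (b+1)) * w := Nat.mul_le_mul_right w (by omega)
        _ ≤ text.length := ht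
    have hset :
        ((List.range t).map (pvSpecRow text w) ++ List.replicate (b+1) (List.replicate w '\x00')).set t (pvSpecRow text w t)
          = (List.range (t+1)).map (pvSpecRow text w) ++ List.replicate b (List.replicate w '\x00') := by
      rw [List.replicate_succ, List.range_succ, List.map_append]
      rw [show t = ((List.range t).map (pvSpecRow text w)).length by simp]
      simp
    have hidx : ((t * w + w : Nat) : Int) = (((t+1) * w : Nat) : Int) := by
      congr 1; ring
    have hnext : t + 1 + b = t + (b + 1) := by omega
    by_cases hev : t % 2 = 0
    · have hev' : (t % 2 == 0) = true := by simp [hev]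
      simp only [hev', if_true]
      have hrow := pvFillRowEven text t w
        ((List.range t).map (pvSpecRow text w) ++ List.replicate (b+1) (List.replicate w '\x00'))
        (t * w) (List.replicate w '\x00') hm (by simp) hk
      rw [hrow]
      have hrw : (List.range w).map (fun j => text.getD (t * w + (w - 1 - j)) '\x00')
            ++ (List.replicate w '\x00').drop w = pvSpecRow text w t := by
        simp [pvSpecRow, pvCol, hev']
      rw [hrw, hset, hidx]
      have := ih (t+1) (by rw [hnext]; exact ht)
      rw [hnext] at this
      exact this
    · have hev' : (t % 2 == 0) = false := by simp [hev]
      simp only [hev', if_false, Bool.false_eq_true]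
      have hrow := pvFillRowOdd text t w 0
        ((List.range t).map (pvSpecRow text w) ++ List.replicate (b+1) (List.replicate w '\x00'))
        (t * w) (List.replicate w '\x00') hm (by simp) hk
      rw [← List.range_eq_range'] at hrow
      rw [hrow]
      have hrw : (List.replicate w '\x00').take 0 ++ (List.range w).map (fun u => text.getD (t * w + u) '\x00')
            ++ (List.replicate w '\x00').drop (0 + w) = pvSpecRow text w t := by
        simp [pvSpecRow, pvCol, hev']
      rw [hrw, hset, hidx]
      have := ih (t+1) (by rw [hnext]; exact ht)
      rw [hnext] at this
      exact this

lemma pvFill_spec (text : List Char) (h w : Nat) (hlen : h * w = text.length) :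
    pvFill text h w = (some ((List.range h).map (pvSpecRow text w)), ((h * w : Nat) : Int)) := by
  have := pvFillRows text w h 0 (by simpa using Nat.le_of_eq hlen)
  simpa [pvFill, List.range_eq_range'] using this

lemma pvRead_spec (text : List Char) (h w : Nat) (hlen : h * w = text.length) :
    pvRead ((List.range h).map (pvSpecRow text w)) h w =
      (List.range w).foldl (fun acc j =>
        (List.range h).foldl (fun acc i =>
          match PySem.List.pyGet? text ((i * w + pvCol i j w : Nat) : Int) with
          | none => acc
          | some c => if c ≠ '@' then acc ++ [c] else acc) acc) [] := by
  unfold pvRead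
  apply PySem.List.foldl_congr_mem
  intro acc j hj
  have hjw : j < w := List.mem_range.mp hj
  apply PySem.List.foldl_congr_mem
  intro acc2 i hi
  have hih : i < h := List.mem_range.mp hi
  have hcol : pvCol i j w < w := by
    unfold pvCol; split <;> omega
  have hidx : i * w + pvCol i j w < text.length := by
    calc i * w + pvCol i j w < i * w + w := by omega
      _ = (i + 1) * w := by ring
      _ ≤ h * w := Nat.mul_le_mul_right w (by omega)
      _ = text.length := hlen
  have hrowv : ((List.range h).map (pvSpecRow text w)).getD i [] = pvSpecRow text w i := by
    simp [List.getD_eq_getElem?_getD, hih]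
  rw [hrowv]
  have hcell : (pvSpecRow text w i).getD j '\x00' = text.getD (i * w + pvCol i j w) '\x00' := by
    simp [pvSpecRow, List.getD_eq_getElem?_getD, hjw]
  rw [hcell]
  rw [PySem.List.pyGet?_natCast, List.getElem?_eq_getElem hidx]
  simp [List.getD_eq_getElem?_getD, List.getElem?_eq_getElem hidx]

-- ===== VERDICT (by name: the statement is the Claim_ definition above) =====
theorem orthogonal_decrypt_spec : Claim_equal_orthogonal_decrypt := by
  intro et s _ hpre
  obtain ⟨hs0, hdvd⟩ := hpre
  unfold Spec_orthogonal_decrypt orthogonal_decrypt orthogonal_decrypt_alt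
  rw [if_neg hs0, if_neg hs0]
  dsimp only
  rcases (lt_or_gt_of_ne hs0) with hneg | hpos
  · have h0 : s.toNat = 0 := Int.toNat_of_nonpos hneg.le
    rw [h0]
    simp [pvFill, pvRead, List.foldl_fixed]
  · have hdvd' : s ∣ (et.toList.length : Int) := hdvd hpos
    have hsh : s = (s.toNat : Int) := (Int.toNat_of_nonneg hpos.le).symm
    have hdvdN : s.toNat ∣ et.toList.length := by
      rw [hsh] at hdvd'
      exact_mod_cast hdvd'
    have hmul : s.toNat * (et.toList.length / s.toNat) = et.toList.length :=
      Nat.mul_div_cancel' hdvdN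
    have hw : (-(PySem.Int.floordiv (-(et.toList.length : Int)) s)).toNat
        = et.toList.length / s.toNat := by
      rw [PySem.Int.floordiv_eq_ediv_of_pos hpos, Int.neg_ediv_of_dvd hdvd', neg_neg]
      rw [hsh, ← Int.natCast_ediv]
      exact Int.toNat_natCast _
    rw [hw]
    rw [pvFill_spec et.toList s.toNat (et.toList.length / s.toNat) hmul]
    dsimp only
    rw [pvRead_spec et.toList s.toNat (et.toList.length / s.toNat) hmul]
    simp only [pvCol]
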